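-- pv_equiv track=rewrite | github.com/jshessen/ha-external-connector | scripts/deploy_shared_config.py | _extract_imports_and_constants
-- ===== SOURCE A (Python) =====
-- def _extract_imports_and_constants(
--     shared_content: str
-- ) -> tuple[list[str], list[str]]:
--     """Extract imports and constants from shared content."""
--     imports: list[str] = []
--     constants: list[str] = []
--     in_constants_section = False
--
--     for line in shared_content.split("\n"):
--         if line.strip().startswith(("import ", "from ")):
--             if not line.strip().startswith("from typing"):
--                 imports.append(line)
--         elif "=== SHARED CONSTANTS ===" in line:
--             in_constants_section = True
--             constants.append(line)
--         elif in_constants_section: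
--             if line.strip().startswith("# ===") and "CONSTANTS" not in line:
--                 break
--             constants.append(line)
--
--     return imports, constants
-- ===== SOURCE B (Python) =====
-- _MARKER = "=== SHARED CONSTANTS ==="
--
--
-- def _is_import(line):
--     s = line.strip()
--     return s.startswith("import ") or s.startswith("from ")
--
--
-- def _extract_imports_and_constants(shared_content):
--     lines = shared_content.split("\n")
--     imports = [line for line in lines
--                if _is_import(line) and not line.strip().startswith("from typing")]
--     constants = []
--     it = iter(lines)
--     for line in it:
--         if _MARKER in line:
--             constants.append(line)
--             break
--     for line in it:
--         if line.strip().startswith("# ===") and "CONSTANTS" not in line: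
--             break
--         if not _is_import(line):
--             constants.append(line)
--     return imports, constants
-- ===== Notes on version B (the rewrite author's own statement) =====
-- stated objective: simpler
-- what changed: Replaced A's single stateful loop (in_constants_section flag, interleaved routing, break) by two independent passes over the lines: a filter comprehension collecting all non-typing import lines, and a find-the-marker-then-copy-until-end-marker scan producing the constants section.
-- intended difference: On inputs whose first shared-constants marker line is itself an import line, or that contain a non-typing import line after the constants section's end-marker line, A accidentally never starts the section (resp. stops collecting imports at the break); B starts the section at the first marker line and collects every import line, which is the intended extraction. — e.g. on _extract_imports_and_constants("from x === SHARED CONSTANTS ===\nA = 1"): A returns (["from x === SHARED CONSTANTS ==="], []), B returns (["from x === SHARED CONSTANTS ==="], ["from x === SHARED CONSTANTS ===", "A = 1"])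
import Mathlib
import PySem

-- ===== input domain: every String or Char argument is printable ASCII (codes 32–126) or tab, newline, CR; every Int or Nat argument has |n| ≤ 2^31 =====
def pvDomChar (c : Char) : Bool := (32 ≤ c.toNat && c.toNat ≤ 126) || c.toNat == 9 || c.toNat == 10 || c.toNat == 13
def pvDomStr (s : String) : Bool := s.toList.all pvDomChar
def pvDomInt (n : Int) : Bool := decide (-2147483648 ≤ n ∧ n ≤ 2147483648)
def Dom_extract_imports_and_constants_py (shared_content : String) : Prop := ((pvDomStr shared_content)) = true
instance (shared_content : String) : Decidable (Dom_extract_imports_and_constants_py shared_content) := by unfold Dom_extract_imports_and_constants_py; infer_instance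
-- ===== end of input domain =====

-- B replaces A's single stateful loop by two independent passes (a filter for the imports, a
-- find-marker-then-copy scan for the constants); on two accidental corners of A, stated in D_
-- below, B returns the intended value instead. Return value only; no side effects involved.

-- shared primitives of both Pythons: shared_content.split("\n") and the three line tests
-- (A writes them inline, Source B names the first one _is_import; they are the same tests)
def pvLines (s : String) : List String :=
  (PySem.Chars.splitOn s.toList ['\n']).map String.ofList

-- line.strip().startswith(("import ", "from "))
def pvImpLine (line : String) : Bool :=
  PySem.Str.startswith (PySem.Str.strip line) "import "
    || PySem.Str.startswith (PySem.Str.strip line) "from "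

-- "=== SHARED CONSTANTS ===" in line
def pvMarkLine (line : String) : Bool := PySem.Str.isIn "=== SHARED CONSTANTS ===" line

-- line.strip().startswith("# ===") and "CONSTANTS" not in line
def pvEndLine (line : String) : Bool :=
  PySem.Str.startswith (PySem.Str.strip line) "# ===" && !(PySem.Str.isIn "CONSTANTS" line)

-- ===== PORT A =====
-- literal transliteration of A's for-loop: state (imports, constants, in_constants_section),
-- branches in A's order, 'break' = returning the accumulators.
def pvALoop : List String → List String → List String → Bool → List String × List String
  | [], imports, constants, _ => (imports, constants)
  | line :: rest, imports, constants, inConst =>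
    if pvImpLine line then
      if !(PySem.Str.startswith (PySem.Str.strip line) "from typing") then
        pvALoop rest (imports ++ [line]) constants inConst
      else
        pvALoop rest imports constants inConst
    else if pvMarkLine line then
      pvALoop rest imports (constants ++ [line]) true
    else if inConst then
      if pvEndLine line then
        (imports, constants)
      else
        pvALoop rest imports (constants ++ [line]) inConst
    else
      pvALoop rest imports constants inConst

def extract_imports_and_constants_py (shared_content : String) : List String × List String :=
  pvALoop (pvLines shared_content) [] [] false

-- ===== PORT B =====
-- Source B's first for-loop over the shared iterator: find the first marker line, append it,
-- and return it together with the iterator's remaining lines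
def pvFindMark : List String → List String × List String
  | [] => ([], [])
  | line :: rest => if pvMarkLine line then ([line], rest) else pvFindMark rest

-- Source B's second for-loop over the remaining lines: break on the end marker, skip import lines
def pvLoop2 : List String → List String
  | [] => []
  | line :: rest =>
    if pvEndLine line then []
    else if !(pvImpLine line) then line :: pvLoop2 rest
    else pvLoop2 rest

def extract_imports_and_constants_py_alt (shared_content : String) : List String × List String :=
  ((pvLines shared_content).filter
      (fun line => pvImpLine line
        && !(PySem.Str.startswith (PySem.Str.strip line) "from typing")),
   (pvFindMark (pvLines shared_content)).1 ++ pvLoop2 (pvFindMark (pvLines shared_content)).2)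

-- ===== PRECONDITION & SPEC =====
-- D_'s own line conditions: a marker line that starts the section, and a kept import line
def pvDStart (l : String) : Bool := pvMarkLine l && !(pvImpLine l)
def pvDKeep (l : String) : Bool :=
  pvImpLine l && !(PySem.Chars.startswith (PySem.Chars.strip l.toList) "from typing".toList)

-- the first marker line exists and is itself an import line
def pvD1 (ls : List String) : Bool :=
  ((ls.find? pvMarkLine).map pvImpLine).getD false

-- the section starts, ends, and a non-typing import line occurs after the end marker
def pvD2 (ls : List String) : Bool :=
  (((ls.dropWhile (fun l => !pvDStart l)).tail.dropWhile (fun l => !pvEndLine l)).tail).any pvDKeep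

-- On inputs whose first shared-constants marker line is itself an import line, or that contain
-- a non-typing import line after the constants section's end-marker line, A accidentally never
-- starts the section (resp. stops collecting imports at the break); B starts the section at the
-- first marker line and collects every import line, which is the intended extraction.
def D_extract_imports_and_constants_py (shared_content : String) : Prop :=
  (pvD1 (pvLines shared_content) || pvD2 (pvLines shared_content)) = true
instance (shared_content : String) : Decidable (D_extract_imports_and_constants_py shared_content) := by unfold D_extract_imports_and_constants_py; infer_instance

def Spec_extract_imports_and_constants_py (shared_content : String) (out : List String × List String) : Prop := ¬ D_extract_imports_and_constants_py shared_content → out = extract_imports_and_constants_py_alt shared_content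
instance (shared_content : String) (out : List String × List String) : Decidable (Spec_extract_imports_and_constants_py shared_content out) := by unfold Spec_extract_imports_and_constants_py; infer_instance

def pvDiffWitness_extract_imports_and_constants_py : String :=
  "from x === SHARED CONSTANTS ===\nA = 1"
def pvDiffWitnessOut_extract_imports_and_constants_py :
    (List String × List String) × (List String × List String) :=
  ((["from x === SHARED CONSTANTS ==="], []),
   (["from x === SHARED CONSTANTS ==="], ["from x === SHARED CONSTANTS ===", "A = 1"]))

-- ===== CLAIM (what is proved, stated in full; the proofs are below) =====
def Claim_unchanged_extract_imports_and_constants_py : Prop := ∀ (shared_content : String), Dom_extract_imports_and_constants_py shared_content → Spec_extract_imports_and_constants_py shared_content (extract_imports_and_constants_py shared_content)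
def Claim_changed_extract_imports_and_constants_py : Prop := Dom_extract_imports_and_constants_py (pvDiffWitness_extract_imports_and_constants_py) ∧ D_extract_imports_and_constants_py (pvDiffWitness_extract_imports_and_constants_py) ∧ extract_imports_and_constants_py (pvDiffWitness_extract_imports_and_constants_py) = pvDiffWitnessOut_extract_imports_and_constants_py.1 ∧ extract_imports_and_constants_py_alt (pvDiffWitness_extract_imports_and_constants_py) = pvDiffWitnessOut_extract_imports_and_constants_py.2 ∧ pvDiffWitnessOut_extract_imports_and_constants_py.1 ≠ pvDiffWitnessOut_extract_imports_and_constants_py.2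
def Claim_exact_extract_imports_and_constants_py : Prop := ∀ (shared_content : String), Dom_extract_imports_and_constants_py shared_content → D_extract_imports_and_constants_py shared_content → extract_imports_and_constants_py shared_content ≠ extract_imports_and_constants_py_alt shared_content

-- ===== LEMMAS AND PROOFS =====

def pvTakewhile (p : String → Bool) : List String → List String
  | [] => []
  | x :: xs => if p x then x :: pvTakewhile p xs else []

def pvDropwhile (p : String → Bool) : List String → List String
  | [] => []
  | x :: xs => if p x then pvDropwhile p xs else x :: xs

lemma pvDropwhile_eq (p : String → Bool) (ls : List String) :
    List.dropWhile p ls = pvDropwhile p ls := by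
  induction ls with
  | nil => simp [pvDropwhile]
  | cons x xs ih =>
    by_cases h : p x = true
    · simp [List.dropWhile_cons, pvDropwhile, h, ih]
    · simp at h; simp [List.dropWhile_cons, pvDropwhile, h]

lemma pvDKeep_eq (l : String) :
    pvDKeep l = (pvImpLine l && !(PySem.Str.startswith (PySem.Str.strip l) "from typing")) := by
  simp [pvDKeep]

-- pvD1 in terms of the dropwhile at the first marker line
lemma pvD1_eq (ls : List String) :
    pvD1 ls = (match pvDropwhile (fun l => !pvMarkLine l) ls with
      | [] => false
      | m :: _ => pvImpLine m) := by
  induction ls with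
  | nil => simp [pvD1, pvDropwhile]
  | cons x xs ih =>
    cases hm : pvMarkLine x with
    | true => simp [pvD1, List.find?_cons, hm, pvDropwhile]
    | false => simpa [pvD1, List.find?_cons, hm, pvDropwhile] using ih

-- pvD2 as the two nested scans
lemma pvD2_eq (ls : List String) :
    pvD2 ls = (match pvDropwhile (fun l => !pvDStart l) ls with
      | [] => false
      | _ :: r =>
        match pvDropwhile (fun l => !pvEndLine l) r with
        | [] => false
        | _ :: t => t.any pvDKeep) := by
  unfold pvD2
  simp only [pvDropwhile_eq]
  cases hS : pvDropwhile (fun l => !pvDStart l) ls with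
  | nil => simp [pvDropwhile]
  | cons m r =>
    simp only [List.tail_cons]
    cases pvDropwhile (fun l => !pvEndLine l) r with
    | nil => rfl
    | cons e t => rfl

-- A's cons step (definitional, stated for rewriting)
lemma pvALoop_cons (line : String) (rest imports constants : List String) (inConst : Bool) :
    pvALoop (line :: rest) imports constants inConst =
      if pvImpLine line then
        if !(PySem.Str.startswith (PySem.Str.strip line) "from typing") then
          pvALoop rest (imports ++ [line]) constants inConst
        else pvALoop rest imports constants inConst
      else if pvMarkLine line then
        pvALoop rest imports (constants ++ [line]) true
      else if inConst then
        if pvEndLine line then (imports, constants)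
        else pvALoop rest imports (constants ++ [line]) inConst
      else pvALoop rest imports constants inConst := rfl

-- two nonempty prefixes of the same list start with the same character
lemma pv_prefix_head {s a b : List Char} {c d : Char}
    (ha : (c :: a) <+: s) (hb : (d :: b) <+: s) : c = d := by
  cases s with
  | nil => simp at ha
  | cons x xs =>
    rw [List.cons_prefix_cons] at ha hb
    exact ha.1.trans hb.1.symm

lemma pv_imp_not_end (l : String) (h : pvImpLine l = true) : pvEndLine l = false := by
  have hs : PySem.Str.startswith (PySem.Str.strip l) "# ===" = false := by
    cases hx : PySem.Str.startswith (PySem.Str.strip l) "# ===" with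
    | false => rfl
    | true =>
      exfalso
      rw [PySem.Str.startswith_eq, PySem.Chars.startswith_iff] at hx
      have hx' : '#' :: " ===".toList <+: (PySem.Str.strip l).toList := hx
      simp only [pvImpLine, Bool.or_eq_true] at h
      rcases h with h1 | h1
      · rw [PySem.Str.startswith_eq, PySem.Chars.startswith_iff] at h1
        have h1' : 'i' :: "mport ".toList <+: (PySem.Str.strip l).toList := h1
        exact absurd (pv_prefix_head h1' hx') (by decide)
      · rw [PySem.Str.startswith_eq, PySem.Chars.startswith_iff] at h1
        have h1' : 'f' :: "rom ".toList <+: (PySem.Str.strip l).toList := h1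
        exact absurd (pv_prefix_head h1' hx') (by decide)
  simp only [pvEndLine, hs, Bool.false_and]

lemma pv_mk_not_end (l : String) (h : pvMarkLine l = true) : pvEndLine l = false := by
  have hc : PySem.Str.isIn "CONSTANTS" l = true := by
    unfold pvMarkLine at h
    rw [PySem.Str.isIn_iff_infix] at h ⊢
    exact List.IsInfix.trans (by decide) h
  simp only [pvEndLine, hc, Bool.not_true, Bool.and_false]

lemma pv_end_not_imp (l : String) (h : pvEndLine l = true) : pvImpLine l = false := by
  cases hi : pvImpLine l with
  | false => rfl
  | true => rw [pv_imp_not_end l hi] at h; cases h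

-- the section phase of A's loop (flag already true) is a takewhile + two filters
lemma pv_loop_true (ls : List String) : ∀ (imports constants : List String),
    pvALoop ls imports constants true =
      (imports ++ (pvTakewhile (fun l => !pvEndLine l) ls).filter pvDKeep,
       constants ++ (pvTakewhile (fun l => !pvEndLine l) ls).filter (fun l => !pvImpLine l)) := by
  induction ls with
  | nil => intro imports constants; simp [pvALoop, pvTakewhile]
  | cons x xs ih =>
    intro imports constants
    rw [pvALoop_cons]
    cases himp : pvImpLine x with
    | true =>
      have hend := pv_imp_not_end x himp
      rw [if_pos rfl]
      cases htyp : PySem.Str.startswith (PySem.Str.strip x) "from typing" with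
      | false =>
        have hk : pvDKeep x = true := by rw [pvDKeep_eq, himp, htyp]; rfl
        rw [if_pos (by simp [htyp]), ih]
        simp [pvTakewhile, hend, List.filter_cons, hk, himp]
      | true =>
        have hk : pvDKeep x = false := by rw [pvDKeep_eq, himp, htyp]; rfl
        rw [if_neg (by simp [htyp]), ih]
        simp [pvTakewhile, hend, List.filter_cons, hk, himp]
    | false =>
      have hk : pvDKeep x = false := by rw [pvDKeep_eq, himp]; rfl
      rw [if_neg (by simp)]
      cases hmk : pvMarkLine x with
      | true =>
        have hend := pv_mk_not_end x hmk
        rw [if_pos rfl, ih]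
        simp [pvTakewhile, hend, List.filter_cons, hk, himp]
      | false =>
        rw [if_neg (by simp), if_pos rfl]
        cases hend : pvEndLine x with
        | true => rw [if_pos rfl]; simp [pvTakewhile, hend]
        | false =>
          rw [if_neg (by simp), ih]
          simp [pvTakewhile, hend, List.filter_cons, hk, himp]

-- phase 1 of A's loop (flag false, constants empty): scan up to the first section start
lemma pv_loop_false (ls : List String) : ∀ (imports : List String),
    pvALoop ls imports [] false =
      (match pvDropwhile (fun l => !pvDStart l) ls with
       | [] => (imports ++ (pvTakewhile (fun l => !pvDStart l) ls).filter pvDKeep, [])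
       | r :: rs =>
         ((imports ++ ((pvTakewhile (fun l => !pvDStart l) ls)
             ++ (r :: pvTakewhile (fun l => !pvEndLine l) rs)).filter pvDKeep),
          (r :: pvTakewhile (fun l => !pvEndLine l) rs).filter (fun l => !pvImpLine l))) := by
  induction ls with
  | nil => intro imports; simp [pvALoop, pvTakewhile, pvDropwhile]
  | cons x xs ih =>
    intro imports
    rw [pvALoop_cons]
    cases himp : pvImpLine x with
    | true =>
      have hst : pvDStart x = false := by unfold pvDStart; rw [himp]; simp
      rw [if_pos rfl]
      cases htyp : PySem.Str.startswith (PySem.Str.strip x) "from typing" with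
      | false =>
        have hk : pvDKeep x = true := by rw [pvDKeep_eq, himp, htyp]; rfl
        rw [if_pos (by simp [htyp]), ih]
        cases hdrop : pvDropwhile (fun l => !pvDStart l) xs with
        | nil => simp [pvTakewhile, pvDropwhile, hst, hdrop, List.filter_cons, hk]
        | cons r rs => simp [pvTakewhile, pvDropwhile, hst, hdrop, List.filter_cons, hk]
      | true =>
        have hk : pvDKeep x = false := by rw [pvDKeep_eq, himp, htyp]; rfl
        rw [if_neg (by simp [htyp]), ih]
        cases hdrop : pvDropwhile (fun l => !pvDStart l) xs with
        | nil => simp [pvTakewhile, pvDropwhile, hst, hdrop, List.filter_cons, hk]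
        | cons r rs => simp [pvTakewhile, pvDropwhile, hst, hdrop, List.filter_cons, hk]
    | false =>
      have hk : pvDKeep x = false := by rw [pvDKeep_eq, himp]; rfl
      rw [if_neg (by simp)]
      cases hmk : pvMarkLine x with
      | true =>
        have hst : pvDStart x = true := by unfold pvDStart; rw [himp, hmk]; rfl
        rw [if_pos rfl, pv_loop_true]
        simp [pvTakewhile, pvDropwhile, hst, List.filter_cons, hk, himp]
      | false =>
        have hst : pvDStart x = false := by unfold pvDStart; rw [hmk]; rfl
        rw [if_neg (by simp [hmk]), if_neg (by simp), ih]
        cases hdrop : pvDropwhile (fun l => !pvDStart l) xs with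
        | nil => simp [pvTakewhile, pvDropwhile, hst, hdrop, List.filter_cons, hk]
        | cons r rs => simp [pvTakewhile, pvDropwhile, hst, hdrop, List.filter_cons, hk]

lemma pvTakewhile_append_dropwhile (p : String → Bool) (ls : List String) :
    pvTakewhile p ls ++ pvDropwhile p ls = ls := by
  induction ls with
  | nil => simp [pvTakewhile, pvDropwhile]
  | cons x xs ih =>
    by_cases h : p x = true
    · simp [pvTakewhile, pvDropwhile, h, ih]
    · simp at h; simp [pvTakewhile, pvDropwhile, h]

lemma pvDropwhile_head (p : String → Bool) :
    ∀ {ls x r}, pvDropwhile p ls = x :: r → p x = false := by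
  intro ls
  induction ls with
  | nil => intro x r h; simp [pvDropwhile] at h
  | cons y ys ih =>
    intro x r h
    by_cases hy : p y = true
    · exact ih (by simpa [pvDropwhile, hy] using h)
    · simp at hy
      simp [pvDropwhile, hy] at h
      rw [← h.1]; exact hy

-- B's find-loop in terms of the dropwhile at the first marker line
lemma pvFindMark_eq (ls : List String) :
    pvFindMark ls =
      (match pvDropwhile (fun l => !pvMarkLine l) ls with
       | [] => (([] : List String), ([] : List String))
       | m :: r => ([m], r)) := by
  induction ls with
  | nil => simp [pvFindMark, pvDropwhile]
  | cons x xs ih =>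
    rw [show pvFindMark (x :: xs)
        = if pvMarkLine x then ([x], xs) else pvFindMark xs from rfl]
    rw [show pvDropwhile (fun l => !pvMarkLine l) (x :: xs)
        = if !pvMarkLine x then pvDropwhile (fun l => !pvMarkLine l) xs else x :: xs from rfl]
    cases hm : pvMarkLine x with
    | true => simp
    | false => simp [ih]

-- B's copy-loop is the takewhile up to the end marker, import lines filtered out
lemma pvLoop2_eq (ls : List String) :
    pvLoop2 ls = (pvTakewhile (fun l => !pvEndLine l) ls).filter (fun l => !pvImpLine l) := by
  induction ls with
  | nil => simp [pvLoop2, pvTakewhile]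
  | cons x xs ih =>
    rw [show pvLoop2 (x :: xs)
        = if pvEndLine x then []
          else if !pvImpLine x then x :: pvLoop2 xs else pvLoop2 xs from rfl]
    rw [show pvTakewhile (fun l => !pvEndLine l) (x :: xs)
        = if !pvEndLine x then x :: pvTakewhile (fun l => !pvEndLine l) xs else [] from rfl]
    cases hend : pvEndLine x with
    | true => simp
    | false =>
      cases himp : pvImpLine x with
      | true => simp [himp, List.filter_cons, ih]
      | false => simp [himp, List.filter_cons, ih]

-- under ¬D1 the first marker line (if any) is a section start, so the two scans agree
lemma pv_drop_start_eq (ls : List String) (h : pvD1 ls = false) :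
    pvDropwhile (fun l => !pvDStart l) ls = pvDropwhile (fun l => !pvMarkLine l) ls ∧
    pvTakewhile (fun l => !pvDStart l) ls = pvTakewhile (fun l => !pvMarkLine l) ls := by
  rw [pvD1_eq] at h
  induction ls with
  | nil => exact ⟨rfl, rfl⟩
  | cons x xs ih =>
    cases hm : pvMarkLine x with
    | true =>
      have hdx : pvDropwhile (fun l => !pvMarkLine l) (x :: xs) = x :: xs := by
        simp [pvDropwhile, hm]
      have himp : pvImpLine x = false := by rw [hdx] at h; exact h
      have hst : pvDStart x = true := by simp [pvDStart, hm, himp]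
      constructor <;> simp [pvDropwhile, pvTakewhile, hst, hm]
    | false =>
      have hst : pvDStart x = false := by simp [pvDStart, hm]
      have h' : (match pvDropwhile (fun l => !pvMarkLine l) xs with
          | [] => false
          | m :: _ => pvImpLine m) = false := by
        have : pvDropwhile (fun l => !pvMarkLine l) (x :: xs)
            = pvDropwhile (fun l => !pvMarkLine l) xs := by simp [pvDropwhile, hm]
        rwa [this] at h
      obtain ⟨h1, h2⟩ := ih h'
      constructor <;> simp [pvDropwhile, pvTakewhile, hst, hm, h1, h2]

-- the filter predicate of B's import comprehension is pvDKeep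
lemma pv_filter_keep :
    (fun line => pvImpLine line
        && !(PySem.Str.startswith (PySem.Str.strip line) "from typing")) = pvDKeep := by
  funext line; rw [pvDKeep_eq]

-- ===== VERDICT (by name: the statements are the Claim_ definitions above) =====
theorem extract_imports_and_constants_py_spec : Claim_unchanged_extract_imports_and_constants_py := by
  intro s _
  unfold Spec_extract_imports_and_constants_py
  intro hD
  have h1 : pvD1 (pvLines s) = false := by
    cases h : pvD1 (pvLines s) with
    | false => rfl
    | true => exact absurd (by unfold D_extract_imports_and_constants_py; simp [h]) hD
  have h2 : pvD2 (pvLines s) = false := by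
    cases h : pvD2 (pvLines s) with
    | false => rfl
    | true => exact absurd (by unfold D_extract_imports_and_constants_py; simp [h]) hD
  unfold extract_imports_and_constants_py extract_imports_and_constants_py_alt
  rw [pv_filter_keep, pvFindMark_eq, pv_loop_false]
  obtain ⟨hdropEq, htakeEq⟩ := pv_drop_start_eq (pvLines s) h1
  rw [hdropEq, htakeEq]
  cases hM : pvDropwhile (fun l => !pvMarkLine l) (pvLines s) with
  | nil =>
    have htake : pvTakewhile (fun l => !pvMarkLine l) (pvLines s) = pvLines s := by
      have := pvTakewhile_append_dropwhile (fun l => !pvMarkLine l) (pvLines s)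
      rwa [hM, List.append_nil] at this
    simp [htake, pvLoop2]
  | cons m r =>
    have himpm : pvImpLine m = false := by
      rw [pvD1_eq, hM] at h1; exact h1
    have hkm : pvDKeep m = false := by rw [pvDKeep_eq, himpm]; rfl
    have hsplit : pvTakewhile (fun l => !pvMarkLine l) (pvLines s) ++ (m :: r) = pvLines s := by
      have := pvTakewhile_append_dropwhile (fun l => !pvMarkLine l) (pvLines s)
      rwa [hM] at this
    have h2' : (match pvDropwhile (fun l => !pvEndLine l) r with
        | [] => false | _ :: t => t.any pvDKeep) = false := by
      rw [pvD2_eq, hdropEq, hM] at h2; exact h2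
    have hfr : r.filter pvDKeep = (pvTakewhile (fun l => !pvEndLine l) r).filter pvDKeep := by
      conv_lhs => rw [← pvTakewhile_append_dropwhile (fun l => !pvEndLine l) r]
      rw [List.filter_append]
      cases hE : pvDropwhile (fun l => !pvEndLine l) r with
      | nil => simp
      | cons e t =>
        rw [hE] at h2'
        have hee : pvEndLine e = true := by
          have := pvDropwhile_head (fun l => !pvEndLine l) hE; simpa using this
        have hke : pvDKeep e = false := by rw [pvDKeep_eq, pv_end_not_imp e hee]; rfl
        have hkt : t.filter pvDKeep = [] := by
          rw [List.filter_eq_nil_iff]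
          intro a ha
          have := (List.any_eq_false).mp h2' a ha
          simp [this]
        simp [List.filter_cons, hke, hkt]
    have hI : List.filter pvDKeep (pvLines s)
        = List.filter pvDKeep (pvTakewhile (fun l => !pvMarkLine l) (pvLines s)
            ++ (m :: pvTakewhile (fun l => !pvEndLine l) r)) := by
      conv_lhs => rw [← hsplit]
      simp [List.filter_append, List.filter_cons, hkm, hfr]
    have hC : ([m] : List String) ++ pvLoop2 r
        = (m :: pvTakewhile (fun l => !pvEndLine l) r).filter (fun l => !pvImpLine l) := by
      rw [pvLoop2_eq]; simp [List.filter_cons, himpm]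
    simp [hI, hC]

theorem extract_imports_and_constants_py_changed : Claim_changed_extract_imports_and_constants_py := by
  unfold Claim_changed_extract_imports_and_constants_py; decide

theorem extract_imports_and_constants_py_tight : Claim_exact_extract_imports_and_constants_py := by
  intro s _ hD hEq
  unfold D_extract_imports_and_constants_py at hD
  rw [Bool.or_eq_true] at hD
  cases hD with
  | inr h2 =>
    cases hS : pvDropwhile (fun l => !pvDStart l) (pvLines s) with
    | nil => rw [pvD2_eq, hS] at h2; simp at h2
    | cons m r =>
      rw [pvD2_eq, hS] at h2
      replace h2 : (match pvDropwhile (fun l => !pvEndLine l) r with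
          | [] => false | _ :: t => t.any pvDKeep) = true := h2
      cases hE : pvDropwhile (fun l => !pvEndLine l) r with
      | nil => rw [hE] at h2; simp at h2
      | cons e t =>
        rw [hE] at h2
        replace h2 : t.any pvDKeep = true := h2
        unfold extract_imports_and_constants_py extract_imports_and_constants_py_alt at hEq
        rw [pv_filter_keep, pvFindMark_eq, pv_loop_false, hS] at hEq
        have h1eq := congrArg Prod.fst hEq
        replace h1eq : List.filter pvDKeep (pvTakewhile (fun l => !pvDStart l) (pvLines s)
            ++ (m :: pvTakewhile (fun l => !pvEndLine l) r))
            = List.filter pvDKeep (pvLines s) := h1eq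
        have hsplitL : pvTakewhile (fun l => !pvDStart l) (pvLines s) ++ (m :: r) = pvLines s := by
          have := pvTakewhile_append_dropwhile (fun l => !pvDStart l) (pvLines s)
          rwa [hS] at this
        have hsplitR : pvTakewhile (fun l => !pvEndLine l) r ++ (e :: t) = r := by
          have := pvTakewhile_append_dropwhile (fun l => !pvEndLine l) r
          rwa [hE] at this
        have hR : List.filter pvDKeep (pvLines s)
            = List.filter pvDKeep (pvTakewhile (fun l => !pvDStart l) (pvLines s))
              ++ (List.filter pvDKeep (m :: pvTakewhile (fun l => !pvEndLine l) r)
                  ++ List.filter pvDKeep (e :: t)) := by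
          conv_lhs => rw [← hsplitL, ← hsplitR]
          simp [List.filter_append, List.filter_cons, List.append_assoc]
          split_ifs <;> simp
        rw [hR] at h1eq
        have hlen := congrArg List.length h1eq
        simp only [List.filter_append, List.length_append] at hlen
        obtain ⟨x, hx, hkx⟩ := List.any_eq_true.mp h2
        have hxmem : x ∈ (e :: t).filter pvDKeep := by
          rw [List.mem_filter]; exact ⟨List.mem_cons_of_mem e hx, hkx⟩
        have hpos : 0 < ((e :: t).filter pvDKeep).length := List.length_pos_of_mem hxmem
        omega
  | inl h1 =>
    cases hM : pvDropwhile (fun l => !pvMarkLine l) (pvLines s) with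
    | nil => rw [pvD1_eq, hM] at h1; simp at h1
    | cons m r =>
      rw [pvD1_eq, hM] at h1
      replace h1 : pvImpLine m = true := h1
      unfold extract_imports_and_constants_py extract_imports_and_constants_py_alt at hEq
      rw [pv_filter_keep, pvFindMark_eq, pv_loop_false, hM] at hEq
      have h2eq := congrArg Prod.snd hEq
      cases hS : pvDropwhile (fun l => !pvDStart l) (pvLines s) with
      | nil =>
        rw [hS] at h2eq
        replace h2eq : ([] : List String) = m :: pvLoop2 r := h2eq
        simp at h2eq
      | cons r' rs' =>
        rw [hS] at h2eq
        replace h2eq : (r' :: pvTakewhile (fun l => !pvEndLine l) rs').filter (fun l => !pvImpLine l)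
            = m :: pvLoop2 r := h2eq
        have hst : pvDStart r' = true := by
          have := pvDropwhile_head (fun l => !pvDStart l) hS; simpa using this
        have himp' : pvImpLine r' = false := by
          unfold pvDStart at hst; simp at hst; exact hst.2
        rw [List.filter_cons] at h2eq
        rw [himp'] at h2eq
        simp at h2eq
        obtain ⟨hrm, -⟩ := h2eq
        rw [hrm] at himp'
        rw [h1] at himp'
        cases himp'
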